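-- pv_equiv track=rewrite | github.com/haolunc/ARC-RL | reference_solutions/solutions/689c358e.py | transform
-- ===== SOURCE A (Python) =====
-- def transform(grid):
--
--     h = len(grid)
--     w = len(grid[0]) if h else 0
--
--     out = [row[:] for row in grid]
--
--     object_colours = {grid[r][c] for r in range(h) for c in range(w)
--                       if grid[r][c] not in (6, 7)}
--
--     for colour in object_colours:
--
--         cells = [(r, c) for r in range(h) for c in range(w) if grid[r][c] == colour]
--
--         rows = [r for r, _ in cells]
--         cols = [c for _, c in cells]
--         min_r, max_r = min(rows), max(rows)
--         min_c, max_c = min(cols), max(cols)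
--
--         height = max_r - min_r + 1
--         width = max_c - min_c + 1
--
--         if height >= width:
--             d_top = min_r
--             d_bottom = (h - 1) - max_r
--             if d_top <= d_bottom:
--                 target_row = 0
--                 opposite_row = h - 1
--
--                 proj_col = next(c for r, c in cells if r == min_r)
--             else:
--                 target_row = h - 1
--                 opposite_row = 0
--                 proj_col = next(c for r, c in cells if r == max_r)
--
--             out[target_row][proj_col] = colour
--             out[opposite_row][proj_col] = 0
--
--         else:
--             d_left = min_c
--             d_right = (w - 1) - max_c
--             if d_left <= d_right:
--                 target_col = 0
--                 opposite_col = w - 1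
--                 proj_row = next(r for r, c in cells if c == min_c)
--             else:
--                 target_col = w - 1
--                 opposite_col = 0
--                 proj_row = next(r for r, c in cells if c == max_c)
--
--             out[proj_row][target_col] = colour
--             out[proj_row][opposite_col] = 0
--
--     return out
-- ===== SOURCE B (Python) =====
-- def transform(grid):
--     h = len(grid)
--     w = len(grid[0]) if h else 0
--
--     colours = set()          # same insertion sequence as A's set comprehension
--     stats = {}               # colour -> [min_r, max_r, min_c, max_c,
--                              #            c_at_min_r, c_at_max_r, r_at_min_c, r_at_max_c]
--     for r in range(h):
--         row = grid[r]
--         for c in range(w):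
--             v = row[c]
--             if v in (6, 7):
--                 continue
--             colours.add(v)
--             s = stats.get(v)
--             if s is None:
--                 stats[v] = [r, r, c, c, c, c, r, r]
--             else:
--                 if r > s[1]:
--                     s[1] = r
--                     s[5] = c
--                 if c < s[2]:
--                     s[2] = c
--                     s[6] = r
--                 if c > s[3]:
--                     s[3] = c
--                     s[7] = r
--
--     out = [row[:] for row in grid]
--     for colour in colours:
--         mnr, mxr, mnc, mxc, cmin, cmax, rmin, rmax = stats[colour]
--         if mxr - mnr >= mxc - mnc:              # tall (or square): project vertically
--             if mnr <= (h - 1) - mxr: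
--                 out[0][cmin] = colour
--                 out[h - 1][cmin] = 0
--             else:
--                 out[h - 1][cmax] = colour
--                 out[0][cmax] = 0
--         else:                                   # wide: project horizontally
--             if mnc <= (w - 1) - mxc:
--                 out[rmin][0] = colour
--                 out[rmin][w - 1] = 0
--             else:
--                 out[rmax][w - 1] = colour
--                 out[rmax][0] = 0
--     return out
-- ===== Notes on version B (the rewrite author's own statement) =====
-- stated objective: faster
-- what changed: A rescans the whole grid once per colour (cells list, mins/maxes, next()-searches); B makes a single row-major pass that buckets per-colour bounding-box bounds and projection cells into a dict, then replays the same set-ordered colour loop using only the dict.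
import Mathlib
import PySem

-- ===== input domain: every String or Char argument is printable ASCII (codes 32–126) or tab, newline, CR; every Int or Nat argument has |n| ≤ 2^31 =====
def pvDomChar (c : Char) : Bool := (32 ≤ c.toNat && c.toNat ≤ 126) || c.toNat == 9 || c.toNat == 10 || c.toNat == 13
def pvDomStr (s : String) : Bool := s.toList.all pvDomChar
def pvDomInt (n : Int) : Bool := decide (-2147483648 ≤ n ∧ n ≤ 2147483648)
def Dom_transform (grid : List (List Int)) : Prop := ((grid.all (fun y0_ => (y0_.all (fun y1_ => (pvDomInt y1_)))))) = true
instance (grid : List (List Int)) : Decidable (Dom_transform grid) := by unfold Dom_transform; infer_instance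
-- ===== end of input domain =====

-- B replaces A's per-colour O(H*W) rescans by one single pass that buckets per-colour bounds
-- and projection cells into a dict (objective: faster, one pass over the grid).
-- Both Pythons iterate the colours of a Python `set` built by the same row-major insertions;
-- that iteration order matters (projection writes can collide), so the shared helpers below
-- model CPython's set-of-ints exactly (open addressing, LINEAR_PROBES=9, perturb>>=5,
-- resize at fill*5 >= mask*3 to 4*used; hash(n)=n except hash(-1)=-2, exact for |n| ≤ 2^31).

-- ===== PORT A =====
-- shared model of Python's `set` of ints (used by both A and B)
def pyIntHash (n : Int) : Int := if n = -1 then -2 else n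
def pyHashU (n : Int) : Nat := ((pyIntHash n).emod (2 ^ 64)).toNat
-- scan slots i, i+1, …, i+cnt: none = continue probing; some (found?, slot) otherwise
def scanSlots (tbl : List (Option Int)) (key : Int) : Nat → Nat → Option (Bool × Nat)
  | i, cnt =>
    match tbl.getD i none with
    | none => some (false, i)
    | some k =>
      if k = key then some (true, i)
      else match cnt with
        | 0 => none
        | cnt' + 1 => scanSlots tbl key (i + 1) cnt'
def probeFind (tbl : List (Option Int)) (key : Int) : Nat → Nat → Nat → (Bool × Nat)
  | 0, _, _ => (false, 0)   -- fuel guard, never reached: the table always keeps a free slot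
  | fuel + 1, i, perturb =>
    let mask := tbl.length - 1
    match scanSlots tbl key i (if i + 9 ≤ mask then 9 else 0) with
    | some res => res
    | none => probeFind tbl key fuel ((i * 5 + 1 + (perturb >>> 5)) &&& mask) (perturb >>> 5)
def firstFree (tbl : List (Option Int)) : Nat → Nat → Option Nat
  | _, 0 => none
  | i, cnt + 1 => if (tbl.getD i none).isNone then some i else firstFree tbl (i + 1) cnt
def insertClean (tbl : List (Option Int)) (key : Int) : Nat → Nat → Nat → List (Option Int)
  | 0, _, _ => tbl          -- fuel guard, never reached
  | fuel + 1, i, perturb =>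
    let mask := tbl.length - 1
    if (tbl.getD i none).isNone then tbl.set i (some key)
    else
      match (if i + 9 ≤ mask then firstFree tbl (i + 1) 9 else none) with
      | some j => tbl.set j (some key)
      | none => insertClean tbl key fuel ((i * 5 + 1 + (perturb >>> 5)) &&& mask) (perturb >>> 5)
def growSize (minused : Nat) : Nat → Nat → Nat
  | s, 0 => s
  | s, fuel + 1 => if s ≤ minused then growSize minused (s * 2) fuel else s
def setResize (tbl : List (Option Int)) (used : Nat) : List (Option Int) × Nat :=
  let minused := if used > 50000 then used * 2 else used * 4
  let newsize := growSize minused 8 64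
  let newtbl := tbl.foldl (fun acc e =>
      match e with
      | none => acc
      | some k => insertClean acc k (acc.length + 32) (pyHashU k &&& (acc.length - 1)) (pyHashU k))
    (List.replicate newsize none)
  (newtbl, used)
def setAdd (st : List (Option Int) × Nat) (key : Int) : List (Option Int) × Nat :=
  match probeFind st.1 key (st.1.length + 32) (pyHashU key &&& (st.1.length - 1)) (pyHashU key) with
  | (true, _) => st
  | (false, slot) =>
    let tbl2 := st.1.set slot (some key)
    let fill2 := st.2 + 1
    if fill2 * 5 ≥ (tbl2.length - 1) * 3 then setResize tbl2 fill2 else (tbl2, fill2)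
def setOrder (tbl : List (Option Int)) : List Int := tbl.filterMap id
def emptySet : List (Option Int) × Nat := (List.replicate 8 none, 0)

-- grid access; exact under Pre_transform (every row is at least w long, indices stay in range)
def valAt (grid : List (List Int)) (r c : Nat) : Int := (grid.getD r []).getD c 0
def setCell (g : List (List Int)) (r c : Nat) (v : Int) : List (List Int) :=
  g.set r ((g.getD r []).set c v)
-- {grid[r][c] for r in range(h) for c in range(w) if grid[r][c] not in (6,7)}: insertion sequence
def insSeq (grid : List (List Int)) (h w : Nat) : List Int :=
  (List.range h).flatMap (fun r => (List.range w).filterMap (fun c =>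
    if valAt grid r c = 6 ∨ valAt grid r c = 7 then none else some (valAt grid r c)))
-- [(r, c) for r in range(h) for c in range(w) if grid[r][c] == colour]
def cellsOf (grid : List (List Int)) (h w : Nat) (colour : Int) : List (Nat × Nat) :=
  (List.range h).flatMap (fun r => (List.range w).filterMap (fun c =>
    if valAt grid r c = colour then some (r, c) else none))
def procA (grid : List (List Int)) (h w : Nat) (out : List (List Int)) (colour : Int) :
    List (List Int) :=
  match _hc : cellsOf grid h w colour with
  | [] => out   -- never reached: the colour occurs in the grid (Python's min would raise on [])
  | c0 :: _ =>
    let cells := cellsOf grid h w colour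
    let rows := cells.map Prod.fst
    let cols := cells.map Prod.snd
    let mnr := (PySem.List.min? rows (fun x => x)).getD 0
    let mxr := (PySem.List.max? rows (fun x => x)).getD 0
    let mnc := (PySem.List.min? cols (fun x => x)).getD 0
    let mxc := (PySem.List.max? cols (fun x => x)).getD 0
    if mxr - mnr + 1 ≥ mxc - mnc + 1 then
      if mnr ≤ (h - 1) - mxr then
        let projCol := ((cells.find? (fun p => p.1 == mnr)).getD c0).2
        setCell (setCell out 0 projCol colour) (h - 1) projCol 0
      else
        let projCol := ((cells.find? (fun p => p.1 == mxr)).getD c0).2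
        setCell (setCell out (h - 1) projCol colour) 0 projCol 0
    else
      if mnc ≤ (w - 1) - mxc then
        let projRow := ((cells.find? (fun p => p.2 == mnc)).getD c0).1
        setCell (setCell out projRow 0 colour) projRow (w - 1) 0
      else
        let projRow := ((cells.find? (fun p => p.2 == mxc)).getD c0).1
        setCell (setCell out projRow (w - 1) colour) projRow 0 0
def transform (grid : List (List Int)) : List (List Int) :=
  let h := grid.length
  let w := (grid.headD []).length
  let colours := setOrder (List.foldl setAdd emptySet (insSeq grid h w)).1
  colours.foldl (procA grid h w) grid   -- out = [row[:] for row in grid] is value-equal to grid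

-- ===== PORT B =====
structure St where
  mnr : Nat
  mxr : Nat
  mnc : Nat
  mxc : Nat
  cmnr : Nat
  cmxr : Nat
  rmnc : Nat
  rmxc : Nat
deriving DecidableEq, Repr
def initSt (p : Nat × Nat) : St := ⟨p.1, p.1, p.2, p.2, p.2, p.2, p.1, p.1⟩
def updSt (s : St) (p : Nat × Nat) : St :=
  let s1 := if s.mxr < p.1 then { s with mxr := p.1, cmxr := p.2 } else s
  let s2 := if p.2 < s1.mnc then { s1 with mnc := p.2, rmnc := p.1 } else s1
  if s2.mxc < p.2 then { s2 with mxc := p.2, rmxc := p.1 } else s2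
def allCells (h w : Nat) : List (Nat × Nat) :=
  (List.range h).flatMap (fun r => (List.range w).map (fun c => (r, c)))
def bstep (grid : List (List Int)) (st : (List (Option Int) × Nat) × PySem.Dict Int St)
    (p : Nat × Nat) : (List (Option Int) × Nat) × PySem.Dict Int St :=
  let v := valAt grid p.1 p.2
  if v = 6 ∨ v = 7 then st
  else
    let s1 := setAdd st.1 v
    let d := match st.2.get? v with
      | none => st.2.insert v (initSt p)
      | some s => st.2.insert v (updSt s p)
    (s1, d)
def procB (h w : Nat) (d : PySem.Dict Int St) (out : List (List Int)) (colour : Int) :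
    List (List Int) :=
  match d.get? colour with
  | none => out   -- never reached: every colour in the set was also recorded in stats
  | some s =>
    if s.mxr - s.mnr ≥ s.mxc - s.mnc then
      if s.mnr ≤ (h - 1) - s.mxr then
        setCell (setCell out 0 s.cmnr colour) (h - 1) s.cmnr 0
      else
        setCell (setCell out (h - 1) s.cmxr colour) 0 s.cmxr 0
    else
      if s.mnc ≤ (w - 1) - s.mxc then
        setCell (setCell out s.rmnc 0 colour) s.rmnc (w - 1) 0
      else
        setCell (setCell out s.rmxc (w - 1) colour) s.rmxc 0 0
def transform_alt (grid : List (List Int)) : List (List Int) :=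
  let h := grid.length
  let w := (grid.headD []).length
  let st := (allCells h w).foldl (bstep grid) (emptySet, PySem.Dict.empty)
  (setOrder st.1.1).foldl (procB h w st.2) grid

-- ===== PRECONDITION & SPEC =====
-- Pre_ excludes exactly the ragged grids on which Python A raises IndexError:
-- A indexes every row at columns 0..len(grid[0])-1, so each row must be at least that long.
def Pre_transform (grid : List (List Int)) : Prop :=
  ∀ row ∈ grid, (grid.headD []).length ≤ row.length
instance (grid : List (List Int)) : Decidable (Pre_transform grid) := by
  unfold Pre_transform; infer_instance
def pvWitness_transform : List (List Int) := [[1, 6], [6, 2]]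
def Spec_transform (grid : List (List Int)) (out : List (List Int)) : Prop := out = transform_alt grid
instance (grid : List (List Int)) (out : List (List Int)) : Decidable (Spec_transform grid out) := by unfold Spec_transform; infer_instance

-- ===== CLAIM (what is proved, stated in full; the proofs are below) =====
def Claim_equal_transform : Prop := ∀ (grid : List (List Int)), Dom_transform grid → Pre_transform grid → Spec_transform grid (transform grid)

-- ===== LEMMAS AND PROOFS =====
theorem mem_insertClean {tbl : List (Option Int)} {key v : Int} :
    ∀ {fuel i p : Nat}, some v ∈ insertClean tbl key fuel i p → v = key ∨ some v ∈ tbl := by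
  intro fuel
  induction fuel with
  | zero => intro i p h; right; simpa [insertClean] using h
  | succ n ih =>
    intro i p h
    simp only [insertClean] at h
    split at h
    · rcases List.mem_or_eq_of_mem_set h with h' | h'
      · right; exact h'
      · left; simpa using h'
    · split at h
      · rcases List.mem_or_eq_of_mem_set h with h' | h'
        · right; exact h'
        · left; simpa using h'
      · exact ih h

theorem mem_resize_fold {v : Int} :
    ∀ (old : List (Option Int)) (acc : List (Option Int)),
      some v ∈ old.foldl (fun acc e =>
        match e with
        | none => acc
        | some k => insertClean acc k (acc.length + 32) (pyHashU k &&& (acc.length - 1)) (pyHashU k)) acc →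
      some v ∈ acc ∨ some v ∈ old := by
  intro old
  induction old with
  | nil => intro acc h; left; simpa using h
  | cons e t ih =>
    intro acc h
    simp only [List.foldl_cons] at h
    rcases ih _ h with h' | h'
    · cases e with
      | none => left; exact h'
      | some k =>
        rcases mem_insertClean h' with rfl | h''
        · right; simp
        · left; exact h''
    · right; exact List.mem_cons_of_mem _ h'

theorem mem_setResize {tbl : List (Option Int)} {used : Nat} {v : Int}
    (h : some v ∈ (setResize tbl used).1) : some v ∈ tbl := by
  simp only [setResize] at h
  rcases mem_resize_fold _ _ h with h' | h'
  · exact absurd (List.eq_of_mem_replicate h') (by simp)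
  · exact h'

theorem mem_setAdd {st : List (Option Int) × Nat} {k v : Int}
    (h : some v ∈ (setAdd st k).1) : v = k ∨ some v ∈ st.1 := by
  simp only [setAdd] at h
  split at h
  · right; exact h
  · split at h
    · rcases List.mem_or_eq_of_mem_set (mem_setResize h) with h' | h'
      · right; exact h'
      · left; simpa using h'
    · rcases List.mem_or_eq_of_mem_set h with h' | h'
      · right; exact h'
      · left; simpa using h'
theorem mem_foldl_setAdd {v : Int} :
    ∀ (L : List Int) (st : List (Option Int) × Nat),
      some v ∈ (List.foldl setAdd st L).1 → some v ∈ st.1 ∨ v ∈ L := by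
  intro L
  induction L with
  | nil => intro st h; left; simpa using h
  | cons x t ih =>
    intro st h
    rcases ih _ h with h' | h'
    · rcases mem_setAdd h' with rfl | h''
      · right; simp
      · left; exact h''
    · right; exact List.mem_cons_of_mem _ h'

theorem mem_setOrder {tbl : List (Option Int)} {v : Int} :
    v ∈ setOrder tbl ↔ some v ∈ tbl := by
  simp [setOrder, List.mem_filterMap]

theorem bstep_fst (grid : List (List Int)) :
    ∀ (cells : List (Nat × Nat)) (s : List (Option Int) × Nat) (d : PySem.Dict Int St),
      (cells.foldl (bstep grid) (s, d)).1 =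
        List.foldl setAdd s (cells.filterMap (fun p =>
          if valAt grid p.1 p.2 = 6 ∨ valAt grid p.1 p.2 = 7 then none
          else some (valAt grid p.1 p.2))) := by
  intro cells
  induction cells with
  | nil => intro s d; rfl
  | cons p t ih =>
    intro s d
    by_cases hv : valAt grid p.1 p.2 = 6 ∨ valAt grid p.1 p.2 = 7
    · simp only [List.foldl_cons, List.filterMap_cons, bstep, if_pos hv]
      exact ih s d
    · simp only [List.foldl_cons, List.filterMap_cons, bstep, if_neg hv]
      split
      · exact ih _ _
      · exact ih _ _

theorem filterMap_vals_flatMap (grid : List (List Int)) (h w : Nat) :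
    (allCells h w).filterMap (fun p =>
        if valAt grid p.1 p.2 = 6 ∨ valAt grid p.1 p.2 = 7 then none
        else some (valAt grid p.1 p.2)) = insSeq grid h w := by
  simp only [allCells, insSeq, List.filterMap_flatMap, List.filterMap_map]
  rfl

theorem filterMap_ite {α β : Type} (f : α → β) (q : α → Prop) [DecidablePred q] (l : List α) :
    (l.filterMap fun a => if q a then some (f a) else none) =
      (l.filter (fun a => decide (q a))).map f := by
  induction l with
  | nil => rfl
  | cons a t ih => by_cases hq : q a <;> simp [hq, ih]

theorem cellsOf_eq_filter (grid : List (List Int)) (h w : Nat) (v : Int) :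
    cellsOf grid h w v = (allCells h w).filter (fun p => valAt grid p.1 p.2 == v) := by
  simp only [cellsOf, allCells, List.filter_flatMap, List.filter_map]
  congr 1
  funext r
  rw [filterMap_ite (fun c => (r, c)) (fun c => valAt grid r c = v)]
  rfl

theorem mem_insSeq {grid : List (List Int)} {h w : Nat} {v : Int}
    (hm : v ∈ insSeq grid h w) :
    ¬(v = 6 ∨ v = 7) ∧ cellsOf grid h w v ≠ [] := by
  simp only [insSeq, List.mem_flatMap, List.mem_filterMap] at hm
  obtain ⟨r, hr, c, hc, hval⟩ := hm
  split at hval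
  · exact absurd hval (by simp)
  · rename_i hv67
    obtain rfl : valAt grid r c = v := by simpa using hval
    refine ⟨hv67, ?_⟩
    have : (r, c) ∈ cellsOf grid (h) (w) (valAt grid r c) := by
      simp only [cellsOf, List.mem_flatMap, List.mem_filterMap]
      exact ⟨r, hr, ⟨c, hc, by simp⟩⟩
    exact List.ne_nil_of_mem this

theorem dict_lookup_foldl (grid : List (List Int)) (v : Int) (hv : ¬(v = 6 ∨ v = 7)) :
    ∀ (cells : List (Nat × Nat)) (s : List (Option Int) × Nat) (d : PySem.Dict Int St),
      ((cells.foldl (bstep grid) (s, d)).2).get? v =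
        match d.get? v, cells.filter (fun p => valAt grid p.1 p.2 == v) with
        | none, [] => none
        | none, c0 :: cr => some (cr.foldl updSt (initSt c0))
        | some st0, cl => some (cl.foldl updSt st0) := by
  intro cells
  induction cells with
  | nil =>
    intro s d
    simp only [List.foldl_nil, List.filter_nil]
    cases d.get? v <;> rfl
  | cons p t ih =>
    intro s d
    by_cases h67 : valAt grid p.1 p.2 = 6 ∨ valAt grid p.1 p.2 = 7
    · have hb : (valAt grid p.1 p.2 == v) = false := by
        simp only [beq_eq_false_iff_ne, ne_eq]
        intro hh; exact hv (hh ▸ h67)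
      simp only [List.foldl_cons, List.filter_cons, bstep, if_pos h67, hb,
        Bool.false_eq_true, if_false]
      exact ih s d
    · by_cases heq : valAt grid p.1 p.2 = v
      · have hb : (valAt grid p.1 p.2 == v) = true := by simpa using heq
        simp only [List.foldl_cons, List.filter_cons, bstep, heq]
        cases hd : d.get? v with
        | none =>
          simp only [ih, if_neg hv, PySem.Dict.get?_insert_self, beq_self_eq_true, if_true]
        | some st0 =>
          simp only [ih, if_neg hv, PySem.Dict.get?_insert_self, beq_self_eq_true, if_true,
            List.foldl_cons]
      · have hb : (valAt grid p.1 p.2 == v) = false := by simpa using heq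
        simp only [List.foldl_cons, List.filter_cons, bstep, if_neg h67, hb,
          Bool.false_eq_true, if_false]
        have hget : ∀ st' : St,
            (d.insert (valAt grid p.1 p.2) st').get? v = d.get? v := by
          intro st'
          rw [PySem.Dict.get?_insert_of_ne]
          exact fun hh => heq hh.symm
        cases d.get? (valAt grid p.1 p.2) <;> simp only [ih, hget]

theorem pairwise_fst_flatMap (rs : List Nat) (f : Nat → List (Nat × Nat))
    (hf : ∀ r p, p ∈ f r → p.1 = r) (hrs : rs.Pairwise (· ≤ ·)) :
    (rs.flatMap f).Pairwise (fun a b => a.1 ≤ b.1) := by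
  induction rs with
  | nil => simp
  | cons r t ih =>
    rw [List.flatMap_cons, List.pairwise_append]
    rcases List.pairwise_cons.mp hrs with ⟨hr, ht⟩
    refine ⟨?_, ih ht, ?_⟩
    · refine List.pairwise_of_forall_mem_list ?_
      intro a ha b hb
      rw [hf r a ha, hf r b hb]
    · intro a ha b hb
      rcases List.mem_flatMap.mp hb with ⟨r', hr', hb'⟩
      rw [hf r a ha, hf r' b hb']
      exact hr _ hr'

theorem cellsOf_pairwise (grid : List (List Int)) (h w : Nat) (v : Int) :
    (cellsOf grid h w v).Pairwise (fun a b => a.1 ≤ b.1) := by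
  apply pairwise_fst_flatMap
  · intro r p hp
    rcases List.mem_filterMap.mp hp with ⟨c, _, hc⟩
    split at hc
    · simpa using (Option.some.injEq _ _ ▸ hc : (r, c) = p) ▸ rfl
    · simp at hc
  · exact (List.pairwise_lt_range).imp Nat.le_of_lt

theorem foldl_min_of_le {a : Nat} : ∀ {l : List Nat}, (∀ x ∈ l, a ≤ x) → l.foldl min a = a := by
  intro l
  induction l generalizing a with
  | nil => intro _; rfl
  | cons x t ih =>
    intro hle
    rw [List.foldl_cons, Nat.min_eq_left (hle x (by simp))]
    exact ih (fun y hy => hle y (by simp [hy]))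

def specSt (c0 : Nat × Nat) (cs : List (Nat × Nat)) : St :=
  { mnr := c0.1
    mxr := cs.foldl (fun a q => max a q.1) c0.1
    mnc := cs.foldl (fun a q => min a q.2) c0.2
    mxc := cs.foldl (fun a q => max a q.2) c0.2
    cmnr := c0.2
    cmxr := (((c0 :: cs).find? (fun q => q.1 == cs.foldl (fun a q => max a q.1) c0.1)).getD c0).2
    rmnc := (((c0 :: cs).find? (fun q => q.2 == cs.foldl (fun a q => min a q.2) c0.2)).getD c0).1
    rmxc := (((c0 :: cs).find? (fun q => q.2 == cs.foldl (fun a q => max a q.2) c0.2)).getD c0).1 }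

theorem St_ext {x y : St} (h1 : x.mnr = y.mnr) (h2 : x.mxr = y.mxr) (h3 : x.mnc = y.mnc)
    (h4 : x.mxc = y.mxc) (h5 : x.cmnr = y.cmnr) (h6 : x.cmxr = y.cmxr) (h7 : x.rmnc = y.rmnc)
    (h8 : x.rmxc = y.rmxc) : x = y := by
  cases x; cases y; simp_all

theorem updSt_mnr (s : St) (p : Nat × Nat) : (updSt s p).mnr = s.mnr := by
  cases s; simp only [updSt]; split_ifs <;> simp_all
theorem updSt_cmnr (s : St) (p : Nat × Nat) : (updSt s p).cmnr = s.cmnr := by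
  cases s; simp only [updSt]; split_ifs <;> simp_all
theorem updSt_mxr (s : St) (p : Nat × Nat) : (updSt s p).mxr = max s.mxr p.1 := by
  cases s; simp only [updSt]; split_ifs <;> simp_all <;> omega
theorem updSt_cmxr (s : St) (p : Nat × Nat) :
    (updSt s p).cmxr = if s.mxr < p.1 then p.2 else s.cmxr := by
  cases s; simp only [updSt]; split_ifs <;> simp_all
theorem updSt_mnc (s : St) (p : Nat × Nat) : (updSt s p).mnc = min s.mnc p.2 := by
  cases s; simp only [updSt]; split_ifs <;> simp_all <;> omega
theorem updSt_rmnc (s : St) (p : Nat × Nat) :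
    (updSt s p).rmnc = if p.2 < s.mnc then p.1 else s.rmnc := by
  cases s; simp only [updSt]; split_ifs <;> simp_all
theorem updSt_mxc (s : St) (p : Nat × Nat) : (updSt s p).mxc = max s.mxc p.2 := by
  cases s; simp only [updSt]; split_ifs <;> simp_all <;> omega
theorem updSt_rmxc (s : St) (p : Nat × Nat) :
    (updSt s p).rmxc = if s.mxc < p.2 then p.1 else s.rmxc := by
  cases s; simp only [updSt]; split_ifs <;> simp_all

theorem le_foldl_min_nat {α : Type} (cs : List α) (f : α → Nat) (a : Nat) :
    cs.foldl (fun x q => min x (f q)) a ≤ a ∧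
      ∀ q ∈ cs, cs.foldl (fun x q => min x (f q)) a ≤ f q := by
  induction cs generalizing a with
  | nil => simp
  | cons x t ih =>
    refine ⟨le_trans (ih (min a (f x))).1 (Nat.min_le_left _ _), ?_⟩
    intro q hq
    rcases List.mem_cons.mp hq with rfl | hq'
    · exact le_trans (ih (min a (f q))).1 (Nat.min_le_right _ _)
    · exact (ih (min a (f x))).2 q hq'

theorem foldl_maxf_mem {α : Type} (cs : List α) (f : α → Nat) (a : Nat) :
    cs.foldl (fun x q => max x (f q)) a = a ∨
      ∃ q ∈ cs, f q = cs.foldl (fun x q => max x (f q)) a := by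
  have h := List.foldl_map (f := f) (g := fun (x : Nat) (y : Nat) => max x y) (l := cs) (init := a)
  rcases PySem.List.foldl_max_mem (cs.map f) a with h' | h'
  · left; rw [← h]; exact h'
  · right
    rcases List.mem_map.mp h' with ⟨q, hq, hfq⟩
    exact ⟨q, hq, by rw [hfq, ← h]⟩

theorem foldl_minf_mem {α : Type} (cs : List α) (f : α → Nat) (a : Nat) :
    cs.foldl (fun x q => min x (f q)) a = a ∨
      ∃ q ∈ cs, f q = cs.foldl (fun x q => min x (f q)) a := by
  have h := List.foldl_map (f := f) (g := fun (x : Nat) (y : Nat) => min x y) (l := cs) (init := a)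
  rcases PySem.List.foldl_min_mem (cs.map f) a with h' | h'
  · left; rw [← h]; exact h'
  · right
    rcases List.mem_map.mp h' with ⟨q, hq, hfq⟩
    exact ⟨q, hq, by rw [hfq, ← h]⟩

theorem updSt_spec_snoc (c0 q : Nat × Nat) (cs : List (Nat × Nat)) :
    updSt (specSt c0 cs) q = specSt c0 (cs ++ [q]) := by
  have hmax1 := PySem.List.le_foldl_max_nat cs (fun p => p.1) c0.1
  have hmin2 := le_foldl_min_nat cs (fun p => p.2) c0.2
  have hmax2 := PySem.List.le_foldl_max_nat cs (fun p => p.2) c0.2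
  apply St_ext
  · rw [updSt_mnr]; rfl
  · rw [updSt_mxr]; simp [specSt, List.foldl_append, Nat.max_comm]
  · rw [updSt_mnc]; simp [specSt, List.foldl_append, Nat.min_comm]
  · rw [updSt_mxc]; simp [specSt, List.foldl_append, Nat.max_comm]
  · rw [updSt_cmnr]; rfl
  · rw [updSt_cmxr]
    simp only [specSt, List.foldl_append, List.foldl_cons, List.foldl_nil]
    by_cases hlt : cs.foldl (fun a q => max a q.1) c0.1 < q.1
    · rw [if_pos hlt, Nat.max_eq_right (Nat.le_of_lt hlt)]
      have hnone : (c0 :: cs).find? (fun p => p.1 == q.1) = none := by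
        apply List.find?_eq_none.mpr
        intro x hx
        rcases List.mem_cons.mp hx with rfl | hx'
        · simpa using Nat.ne_of_lt (lt_of_le_of_lt hmax1.1 hlt)
        · simpa using Nat.ne_of_lt (lt_of_le_of_lt (hmax1.2 x hx') hlt)
      rw [show (c0 :: (cs ++ [q])) = (c0 :: cs) ++ [q] by simp,
        List.find?_append, hnone]
      simp
    · rw [if_neg hlt, Nat.max_eq_left (Nat.not_lt.mp hlt)]
      have hsome : ∃ x, (c0 :: cs).find? (fun p => p.1 == cs.foldl (fun a q => max a q.1) c0.1) = some x := by
        rw [← Option.isSome_iff_exists, List.find?_isSome]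
        rcases foldl_maxf_mem cs (fun p => p.1) c0.1 with hm | ⟨x, hx, hfx⟩
        · exact ⟨c0, by simp, by simpa using hm.symm⟩
        · exact ⟨x, by simp [hx], by simpa using hfx⟩
      obtain ⟨x, hx⟩ := hsome
      rw [show (c0 :: (cs ++ [q])) = (c0 :: cs) ++ [q] by simp,
        List.find?_append, hx]
      simp
  · rw [updSt_rmnc]
    simp only [specSt, List.foldl_append, List.foldl_cons, List.foldl_nil]
    by_cases hlt : q.2 < cs.foldl (fun a q => min a q.2) c0.2
    · rw [if_pos hlt, Nat.min_eq_right (Nat.le_of_lt hlt)]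
      have hnone : (c0 :: cs).find? (fun p => p.2 == q.2) = none := by
        apply List.find?_eq_none.mpr
        intro x hx
        rcases List.mem_cons.mp hx with rfl | hx'
        · simpa using (Nat.ne_of_lt (lt_of_lt_of_le hlt hmin2.1)).symm
        · simpa using (Nat.ne_of_lt (lt_of_lt_of_le hlt (hmin2.2 x hx'))).symm
      rw [show (c0 :: (cs ++ [q])) = (c0 :: cs) ++ [q] by simp,
        List.find?_append, hnone]
      simp
    · rw [if_neg hlt, Nat.min_eq_left (Nat.not_lt.mp hlt)]
      have hsome : ∃ x, (c0 :: cs).find? (fun p => p.2 == cs.foldl (fun a q => min a q.2) c0.2) = some x := by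
        rw [← Option.isSome_iff_exists, List.find?_isSome]
        rcases foldl_minf_mem cs (fun p => p.2) c0.2 with hm | ⟨x, hx, hfx⟩
        · exact ⟨c0, by simp, by simpa using hm.symm⟩
        · exact ⟨x, by simp [hx], by simpa using hfx⟩
      obtain ⟨x, hx⟩ := hsome
      rw [show (c0 :: (cs ++ [q])) = (c0 :: cs) ++ [q] by simp,
        List.find?_append, hx]
      simp
  · rw [updSt_rmxc]
    simp only [specSt, List.foldl_append, List.foldl_cons, List.foldl_nil]
    by_cases hlt : cs.foldl (fun a q => max a q.2) c0.2 < q.2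
    · rw [if_pos hlt, Nat.max_eq_right (Nat.le_of_lt hlt)]
      have hnone : (c0 :: cs).find? (fun p => p.2 == q.2) = none := by
        apply List.find?_eq_none.mpr
        intro x hx
        rcases List.mem_cons.mp hx with rfl | hx'
        · simpa using Nat.ne_of_lt (lt_of_le_of_lt hmax2.1 hlt)
        · simpa using Nat.ne_of_lt (lt_of_le_of_lt (hmax2.2 x hx') hlt)
      rw [show (c0 :: (cs ++ [q])) = (c0 :: cs) ++ [q] by simp,
        List.find?_append, hnone]
      simp
    · rw [if_neg hlt, Nat.max_eq_left (Nat.not_lt.mp hlt)]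
      have hsome : ∃ x, (c0 :: cs).find? (fun p => p.2 == cs.foldl (fun a q => max a q.2) c0.2) = some x := by
        rw [← Option.isSome_iff_exists, List.find?_isSome]
        rcases foldl_maxf_mem cs (fun p => p.2) c0.2 with hm | ⟨x, hx, hfx⟩
        · exact ⟨c0, by simp, by simpa using hm.symm⟩
        · exact ⟨x, by simp [hx], by simpa using hfx⟩
      obtain ⟨x, hx⟩ := hsome
      rw [show (c0 :: (cs ++ [q])) = (c0 :: cs) ++ [q] by simp,
        List.find?_append, hx]
      simp

theorem foldl_updSt_spec (c0 : Nat × Nat) (cs : List (Nat × Nat)) :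
    cs.foldl updSt (initSt c0) = specSt c0 cs := by
  induction cs using List.reverseRecOn with
  | nil => simp [specSt, initSt, List.find?]
  | append_singleton cs q ih =>
    rw [List.foldl_append, List.foldl_cons, List.foldl_nil, ih, updSt_spec_snoc]

theorem foldl_minf_of_le (c0 : Nat × Nat) (cr : List (Nat × Nat))
    (H : ∀ q ∈ cr, c0.1 ≤ q.1) : cr.foldl (fun a q => min a q.1) c0.1 = c0.1 := by
  have h := foldl_min_of_le (a := c0.1) (l := cr.map Prod.fst)
    (fun x hx => by rcases List.mem_map.mp hx with ⟨q, hq, rfl⟩; exact H q hq)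
  rwa [List.foldl_map] at h

theorem procA_eq_procB (grid : List (List Int)) (h w : Nat) (v : Int)
    (_hv67 : ¬(v = 6 ∨ v = 7)) (c0 : Nat × Nat) (cr : List (Nat × Nat))
    (hcells : cellsOf grid h w v = c0 :: cr) (d : PySem.Dict Int St)
    (hd : d.get? v = some (specSt c0 cr)) (out : List (List Int)) :
    procA grid h w out v = procB h w d out v := by
  have Hle : ∀ q ∈ cr, c0.1 ≤ q.1 := by
    have hp := cellsOf_pairwise grid h w v
    rw [hcells] at hp
    exact fun q hq => (List.pairwise_cons.mp hp).1 q hq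
  simp only [procA]
  split
  next hc => rw [hcells] at hc; cases hc
  next c0' tail hc =>
    rw [hcells] at hc
    injection hc with h1 h2
    subst h1; subst h2
    simp only [hcells, procB, hd]
    simp only [List.map_cons, PySem.List.min?_id_cons, PySem.List.max?_id_cons, Option.getD_some,
      List.foldl_map]
    rw [foldl_minf_of_le c0 cr Hle]
    have hfind : ((c0 :: cr).find? (fun p => p.1 == c0.1)).getD c0 = c0 := by
      simp
    simp only [specSt, hfind]
    have hcond : (cr.foldl (fun a q => max a q.1) c0.1 - c0.1 + 1 ≥
        cr.foldl (fun a q => max a q.2) c0.2 - cr.foldl (fun a q => min a q.2) c0.2 + 1) ↔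
        (cr.foldl (fun a q => max a q.1) c0.1 - c0.1 ≥
        cr.foldl (fun a q => max a q.2) c0.2 - cr.foldl (fun a q => min a q.2) c0.2) := by
      omega
    rw [if_congr hcond rfl rfl]

theorem transform_eq_alt : ∀ (grid : List (List Int)), transform grid = transform_alt grid := by
  intro grid
  simp only [transform, transform_alt]
  rw [bstep_fst, filterMap_vals_flatMap]
  refine (PySem.List.foldl_congr_mem' _ _ _ _ ?_).symm
  intro v hv out
  have hins : v ∈ insSeq grid grid.length (grid.headD []).length := by
    rcases mem_foldl_setAdd _ _ (mem_setOrder.mp hv) with h' | h'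
    · exact absurd (List.eq_of_mem_replicate h') (by simp)
    · exact h'
  obtain ⟨hv67, hne⟩ := mem_insSeq hins
  obtain ⟨c0, cr, hcells⟩ := List.exists_cons_of_ne_nil hne
  refine (procA_eq_procB _ _ _ v hv67 c0 cr hcells _ ?_ out).symm
  rw [dict_lookup_foldl _ v hv67, ← cellsOf_eq_filter, hcells]
  have hempty : (PySem.Dict.empty : PySem.Dict Int St).get? v = none := by rfl
  rw [hempty]; exact congrArg some (foldl_updSt_spec c0 cr)

-- ===== VERDICT (by name: the statement is the Claim_ definition above) =====
theorem transform_spec : Claim_equal_transform := by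
  intro grid _ _
  exact transform_eq_alt grid
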